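-- pv_equiv track=rewrite | github.com/AsumVictor/master-Algorithms | career/helper.py | get_visit_times
-- ===== SOURCE A (Python) =====
-- def get_visit_times(slots):
--     sequence_count = 0
--     count = 0
--     for n in range(36):
--         if slots.get(n, 0) > 0:
--
--             if sequence_count >= 0:
--                 count += 1
--                 sequence_count = -1
--             else:
--                 sequence_count = -1
--         else:
--             sequence_count += 1
--
--     return (count)
-- ===== SOURCE B (Python) =====
-- def get_visit_times(slots):
--     occ = [slots.get(n, 0) > 0 for n in range(36)]
--     total = sum(occ)
--     pairs = sum(1 for a, b in zip(occ, occ[1:]) if a and b)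
--     return total - pairs
-- ===== Notes on version B (the rewrite author's own statement) =====
-- stated objective: alternative
-- what changed: Replaces A's stateful single-scan run detector (sequence_count flag machine) with two independent counts combined arithmetically: occupied slots minus adjacent occupied pairs (each run of length L contributes L - (L-1) = 1).
import Mathlib
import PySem

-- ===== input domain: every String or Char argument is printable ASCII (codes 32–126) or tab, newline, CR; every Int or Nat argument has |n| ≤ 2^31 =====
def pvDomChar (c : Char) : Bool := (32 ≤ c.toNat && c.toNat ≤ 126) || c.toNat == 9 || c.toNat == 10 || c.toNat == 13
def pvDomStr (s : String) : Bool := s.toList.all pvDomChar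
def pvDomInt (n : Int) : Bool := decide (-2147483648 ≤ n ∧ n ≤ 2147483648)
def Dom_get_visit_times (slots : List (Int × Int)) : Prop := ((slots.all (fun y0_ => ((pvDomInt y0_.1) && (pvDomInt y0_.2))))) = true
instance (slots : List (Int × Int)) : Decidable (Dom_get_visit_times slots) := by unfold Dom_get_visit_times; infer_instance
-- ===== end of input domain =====

-- B replaces A's stateful run-detection scan with occupied-count minus adjacent-pair-count (alternative decomposition, same cost).
-- ===== PORT A =====
-- stateful scan: sequence_count >= 0 means "previous slot was empty (or start)"
def get_visit_times (slots : List (Int × Int)) : Int :=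
  (((PySem.List.pyRange 0 36 1).foldl
      (fun (st : Int × Int) n =>
        if (PySem.Dict.ofList slots).getD n 0 > 0 then
          if st.1 ≥ 0 then (-1, st.2 + 1) else (-1, st.2)
        else
          (st.1 + 1, st.2))
      (0, 0)).2)

-- ===== PORT B =====
-- B: occupancy list; total occupied minus adjacent occupied pairs = number of runs
def get_visit_times_alt (slots : List (Int × Int)) : Int :=
  let occ := (PySem.List.pyRange 0 36 1).map
      (fun n => decide ((PySem.Dict.ofList slots).getD n 0 > 0))
  let total : Int := occ.count true
  let pairs : Int := ((occ.zip (occ.drop 1)).filter (fun p => p.1 && p.2)).length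
  total - pairs

-- ===== PRECONDITION & SPEC =====
def Spec_get_visit_times (slots : List (Int × Int)) (out : Int) : Prop := out = get_visit_times_alt slots
instance (slots : List (Int × Int)) (out : Int) : Decidable (Spec_get_visit_times slots out) := by unfold Spec_get_visit_times; infer_instance

-- ===== CLAIM (what is proved, stated in full; the proofs are below) =====
def Claim_equal_get_visit_times : Prop := ∀ (slots : List (Int × Int)), Dom_get_visit_times slots → Spec_get_visit_times slots (get_visit_times slots)

-- ===== LEMMAS AND PROOFS =====

-- A's fold, abstracted over the occupancy booleans
def pvFoldA (st : Int × Int) : List Bool → Int × Int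
  | [] => st
  | b :: t =>
      pvFoldA (if b then (if st.1 ≥ 0 then (-1, st.2 + 1) else (-1, st.2))
               else (st.1 + 1, st.2)) t

-- number of runs of `true`, given whether the previous element was `true`
def pvRuns (prev : Bool) : List Bool → Int
  | [] => 0
  | b :: t => (if b && !prev then 1 else 0) + pvRuns b t

-- adjacent true pairs, counting a (prev, head) pair too
def pvPairs (prev : Bool) : List Bool → Int
  | [] => 0
  | b :: t => (if prev && b then 1 else 0) + pvPairs b t

theorem pvFoldA_eq (occ : List Bool) (sc count : Int) (hsc : -1 ≤ sc) :
    (pvFoldA (sc, count) occ).2 = count + pvRuns (decide (sc < 0)) occ := by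
  induction occ generalizing sc count with
  | nil => simp [pvFoldA, pvRuns]
  | cons b t ih =>
    cases b with
    | true =>
      by_cases h : (sc : Int) ≥ 0
      · have e1 : (decide (sc < 0)) = false := by simp; omega
        simp only [pvFoldA, if_pos h, if_true]
        rw [ih (-1) (count + 1) (by omega)]
        simp [pvRuns, e1]; ring
      · have e1 : (decide (sc < 0)) = true := by simp; omega
        simp only [pvFoldA, if_neg h, if_true]
        rw [ih (-1) count (by omega)]
        simp [pvRuns, e1]
    | false =>
      have e1 : (decide (sc + 1 < 0)) = false := by simp; omega
      simp only [pvFoldA, Bool.false_eq_true, if_false]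
      rw [ih (sc + 1) count (by omega)]
      simp [pvRuns, e1]

theorem pvRuns_eq (occ : List Bool) (prev : Bool) :
    pvRuns prev occ = (occ.count true : Int) - pvPairs prev occ := by
  induction occ generalizing prev with
  | nil => simp [pvRuns, pvPairs]
  | cons b t ih =>
    cases b <;> cases prev <;>
      simp [pvRuns, pvPairs, ih] <;> ring

theorem pvPairs_zip (occ : List Bool) :
    (((occ.zip (occ.drop 1)).filter (fun p => p.1 && p.2)).length : Int)
      = pvPairs false occ := by
  induction occ with
  | nil => simp [pvPairs]
  | cons b t ih =>
    cases t with
    | nil => simp [pvPairs]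
    | cons c u =>
      have h : pvPairs b (c :: u)
          = (if b && c then 1 else 0) + pvPairs c u := by
        cases b <;> cases c <;> simp [pvPairs]
      simp only [pvPairs, List.drop_succ_cons, List.drop_zero, List.zip_cons_cons,
        List.filter_cons] at ih ⊢
      cases b <;> cases c <;> simp_all <;> omega

-- ===== VERDICT (by name: the statement is the Claim_ definition above) =====
theorem pvFoldA_bridge (d : PySem.Dict Int Int) (l : List Int) (st : Int × Int) :
    l.foldl
      (fun (st : Int × Int) n =>
        if d.getD n 0 > 0 then
          if st.1 ≥ 0 then (-1, st.2 + 1) else (-1, st.2)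
        else (st.1 + 1, st.2)) st
    = pvFoldA st (l.map (fun n => decide (d.getD n 0 > 0))) := by
  induction l generalizing st with
  | nil => rfl
  | cons a t ih =>
    by_cases h : d.getD a 0 > 0 <;> simp [pvFoldA, h, ih]

theorem get_visit_times_spec : Claim_equal_get_visit_times := by
  intro slots _
  unfold Spec_get_visit_times get_visit_times get_visit_times_alt
  rw [pvFoldA_bridge, pvFoldA_eq _ 0 0 (by omega), pvRuns_eq,
    show (decide ((0:Int) < 0)) = false from rfl]
  simp [← pvPairs_zip, List.count_eq_countP, List.countP_eq_length_filter]
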